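-- pv_equiv track=rewrite | github.com/NozomuGezumoto/my-wagyu | scripts/fetch_season_calendars.py | merge_months
-- ===== SOURCE A (Python) =====
-- def merge_months(month_lists: list[list[int]]) -> list[int]:
--     """複数ソースで同じ魚の旬月がズレる場合: 最頻月＋前後1ヶ月の和集合。"""
--     if not month_lists:
--         return []
--     all_months: set[int] = set()
--     for months in month_lists:
--         for m in months:
--             if 1 <= m <= 12:
--                 all_months.add(m)
--                 all_months.add((m - 2) % 12 + 1)  # 前月
--                 all_months.add((m % 12) + 1)      # 翌月
--     return sorted([m for m in all_months if 1 <= m <= 12])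
-- ===== SOURCE B (Python) =====
-- def merge_months(month_lists: list[list[int]]) -> list[int]:
--     """複数ソースで同じ魚の旬月がズレる場合: 最頻月＋前後1ヶ月の和集合."""
--     mask = 0
--     for months in month_lists:
--         for m in months:
--             if 1 <= m <= 12:
--                 mask |= 1 << (m - 1)
--     cover = (mask | (mask << 1) | (mask >> 11) | (mask >> 1) | (mask << 11)) & 0xFFF
--     return [i + 1 for i in range(12) if (cover >> i) & 1]
-- ===== Notes on version B (the rewrite author's own statement) =====
-- stated objective: alternative
-- what changed: Instead of inserting each valid month and its two neighbours into a set per element and sorting at the end, B collects only the months themselves into a 12-bit integer mask and performs the neighbour expansion ONCE on the whole aggregate by cyclic bit rotations (mask | rotl1 | rotr1), then reads the bits out in index order, so no per-element neighbour arithmetic and no sort.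
import Mathlib
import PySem

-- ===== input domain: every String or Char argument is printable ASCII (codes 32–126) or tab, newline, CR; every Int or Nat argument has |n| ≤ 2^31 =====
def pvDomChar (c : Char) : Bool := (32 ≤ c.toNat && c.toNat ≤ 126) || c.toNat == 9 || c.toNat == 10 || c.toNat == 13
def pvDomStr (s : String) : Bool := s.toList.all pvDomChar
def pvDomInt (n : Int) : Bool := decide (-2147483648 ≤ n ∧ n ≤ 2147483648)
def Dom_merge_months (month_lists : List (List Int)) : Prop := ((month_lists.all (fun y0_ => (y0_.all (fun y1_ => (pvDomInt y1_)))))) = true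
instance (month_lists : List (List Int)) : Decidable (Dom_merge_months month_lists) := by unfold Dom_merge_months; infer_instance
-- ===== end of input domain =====

-- B collects only the valid months themselves into a 12-bit mask and expands to the
-- neighbours ONCE at the end by cyclic bit rotation, reading the bits out in index
-- order, instead of A's per-element three-way set insertion followed by sorted()
-- (objective: alternative).

-- ===== PORT A =====
def merge_months (month_lists : List (List Int)) : List Int :=
  if month_lists = [] then []
  else
    let all_months : PySem.Set Int :=
      month_lists.foldl (fun s months =>
        months.foldl (fun s m =>
          if 1 ≤ m ∧ m ≤ 12 then
            PySem.Set.add (PySem.Set.add (PySem.Set.add s m) (PySem.Int.mod (m - 2) 12 + 1))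
              (PySem.Int.mod m 12 + 1)
          else s) s) PySem.Set.empty
    PySem.List.sorted (all_months.filter (fun m => decide (1 ≤ m ∧ m ≤ 12))) (fun x => x) false

-- ===== PORT B =====
-- Python's `mask` is always a nonnegative int here, so Nat is exact; `(m-1).toNat`
-- is exact because the branch guarantees 1 ≤ m; `(cover >> i) & 1` truthiness is
-- exactly `Nat.testBit cover i`.
def merge_months_alt (month_lists : List (List Int)) : List Int :=
  let mask : Nat :=
    month_lists.foldl (fun mask months =>
      months.foldl (fun mask (m : Int) =>
        if 1 ≤ m ∧ m ≤ 12 then mask ||| (1 <<< (m - 1).toNat) else mask) mask) 0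
  let cover : Nat :=
    (mask ||| (mask <<< 1) ||| (mask >>> 11) ||| (mask >>> 1) ||| (mask <<< 11)) &&& 4095
  (PySem.List.pyRange 0 12 1).foldl
    (fun acc i => if Nat.testBit cover i.toNat then acc ++ [i + 1] else acc) []

-- ===== PRECONDITION & SPEC =====
def Spec_merge_months (month_lists : List (List Int)) (out : List Int) : Prop := out = merge_months_alt month_lists
instance (month_lists : List (List Int)) (out : List Int) : Decidable (Spec_merge_months month_lists out) := by unfold Spec_merge_months; infer_instance

-- ===== CLAIM (what is proved, stated in full; the proofs are below) =====
def Claim_equal_merge_months : Prop := ∀ (month_lists : List (List Int)), Dom_merge_months month_lists → Spec_merge_months month_lists (merge_months month_lists)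

-- ===== LEMMAS AND PROOFS =====

-- covb ms x: x is the month m itself, its predecessor or its successor,
-- for some valid m in ms
def covb (ms : List Int) (x : Int) : Bool :=
  ms.any (fun m => decide (1 ≤ m ∧ m ≤ 12) &&
    (decide (x = m) || decide (x = PySem.Int.mod (m - 2) 12 + 1) ||
     decide (x = PySem.Int.mod m 12 + 1)))

-- abbreviations for the two ports' inner loop bodies (defeq to the ports' lambdas)
def fA (s : PySem.Set Int) (m : Int) : PySem.Set Int :=
  if 1 ≤ m ∧ m ≤ 12 then
    PySem.Set.add (PySem.Set.add (PySem.Set.add s m) (PySem.Int.mod (m - 2) 12 + 1))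
      (PySem.Int.mod m 12 + 1)
  else s

def fB (mask : Nat) (m : Int) : Nat :=
  if 1 ≤ m ∧ m ≤ 12 then mask ||| (1 <<< (m - 1).toNat) else mask

lemma covb_cons (m : Int) (ms : List Int) (x : Int) :
    covb (m :: ms) x = true ↔
      ((1 ≤ m ∧ m ≤ 12) ∧
        (x = m ∨ x = PySem.Int.mod (m - 2) 12 + 1 ∨ x = PySem.Int.mod m 12 + 1)) ∨
      covb ms x = true := by
  simp [covb, or_assoc]

lemma memA (ms : List Int) (s : PySem.Set Int) (x : Int) :
    x ∈ ms.foldl fA s ↔ x ∈ s ∨ covb ms x = true := by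
  induction ms generalizing s with
  | nil => simp [covb]
  | cons m ms ih =>
    rw [List.foldl_cons, ih, covb_cons]
    unfold fA
    split_ifs with h
    · simp [PySem.Set.mem_add, h]; tauto
    · simp [h]

lemma nodupA (ms : List Int) (s : PySem.Set Int) (hs : s.Nodup) : (ms.foldl fA s).Nodup := by
  induction ms generalizing s with
  | nil => exact hs
  | cons m ms ih =>
    rw [List.foldl_cons]
    apply ih
    unfold fA
    split_ifs with h
    · exact PySem.Set.nodup_add _ _ (PySem.Set.nodup_add _ _ (PySem.Set.nodup_add _ _ hs))
    · exact hs

lemma mod12_emod (a : Int) : PySem.Int.mod a 12 = a % 12 := by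
  unfold PySem.Int.mod
  rw [Int.fmod_eq_emod]
  simp

-- bit j of the mask is set iff some valid month m with m - 1 = j occurs in ms
lemma testBit_maskFold (ms : List Int) (base : Nat) (j : Nat) :
    (ms.foldl fB base).testBit j =
      (base.testBit j || decide (∃ m ∈ ms, (1 ≤ m ∧ m ≤ 12) ∧ m - 1 = (j : Int))) := by
  induction ms generalizing base with
  | nil => simp
  | cons m ms ih =>
    rw [List.foldl_cons, ih]
    unfold fB
    split_ifs with h
    · have h1 : (1 : Nat) <<< (m - 1).toNat = 2 ^ (m - 1).toNat := by
        rw [Nat.shiftLeft_eq, one_mul]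
      rw [h1, Nat.testBit_lor, Nat.testBit_two_pow, Bool.eq_iff_iff]
      simp only [Bool.or_eq_true, decide_eq_true_eq, List.mem_cons]
      constructor
      · rintro ((hb | he) | ⟨m', hm', hv', he'⟩)
        · exact Or.inl hb
        · exact Or.inr ⟨m, Or.inl rfl, h, by omega⟩
        · exact Or.inr ⟨m', Or.inr hm', hv', he'⟩
      · rintro (hb | ⟨m', (rfl | hm'), hv', he'⟩)
        · exact Or.inl (Or.inl hb)
        · exact Or.inl (Or.inr (by omega))
        · exact Or.inr ⟨m', hm', hv', he'⟩
    · rw [Bool.eq_iff_iff]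
      simp only [Bool.or_eq_true, decide_eq_true_eq, List.mem_cons]
      constructor
      · rintro (hb | ⟨m', hm', hv', he'⟩)
        · exact Or.inl hb
        · exact Or.inr ⟨m', Or.inr hm', hv', he'⟩
      · rintro (hb | ⟨m', (rfl | hm'), hv', he'⟩)
        · exact Or.inl hb
        · exact absurd hv' h
        · exact Or.inr ⟨m', hm', hv', he'⟩

-- bit j (j < 12) of the rotated-and-masked cover is set iff month j+1 is covered
lemma testBit_cover (ms : List Int) (j : Nat) (hj : j < 12) :
    ((ms.foldl fB 0 ||| (ms.foldl fB 0 <<< 1) ||| (ms.foldl fB 0 >>> 11) |||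
      (ms.foldl fB 0 >>> 1) ||| (ms.foldl fB 0 <<< 11)) &&& 4095).testBit j =
      covb ms ((j : Int) + 1) := by
  have h4095 : (4095 : Nat) = 2 ^ 12 - 1 := by norm_num
  rw [Bool.eq_iff_iff]
  simp only [h4095, Nat.testBit_land, Nat.testBit_lor, Nat.testBit_shiftLeft,
    Nat.testBit_shiftRight, Nat.testBit_two_pow_sub_one, testBit_maskFold,
    Nat.zero_testBit, Bool.false_or, Bool.and_eq_true, Bool.or_eq_true,
    decide_eq_true_eq, ge_iff_le, covb, List.any_eq_true]
  constructor
  · rintro ⟨(((⟨m, hm, hv, he⟩ | ⟨h1, m, hm, hv, he⟩) | ⟨m, hm, hv, he⟩) |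
      ⟨m, hm, hv, he⟩) | ⟨h11, m, hm, hv, he⟩, -⟩ <;>
      refine ⟨m, hm, hv, ?_⟩ <;> rw [mod12_emod, mod12_emod] <;> omega
  · rintro ⟨m, hm, hv, hd⟩
    rw [mod12_emod, mod12_emod] at hd
    refine ⟨?_, hj⟩
    by_cases e1 : m - 1 = (j : Int)
    · exact Or.inl (Or.inl (Or.inl (Or.inl ⟨m, hm, hv, e1⟩)))
    · by_cases e2 : 1 ≤ j ∧ m - 1 = ((j - 1 : Nat) : Int)
      · exact Or.inl (Or.inl (Or.inl (Or.inr ⟨e2.1, m, hm, hv, e2.2⟩)))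
      · by_cases e3 : m - 1 = ((11 + j : Nat) : Int)
        · exact Or.inl (Or.inl (Or.inr ⟨m, hm, hv, e3⟩))
        · by_cases e4 : m - 1 = ((1 + j : Nat) : Int)
          · exact Or.inl (Or.inr ⟨m, hm, hv, e4⟩)
          · refine Or.inr ⟨by omega, m, hm, hv, by omega⟩

-- the common normal form: the valid months covered by ms, in increasing order
def target (ms : List Int) : List Int :=
  ((PySem.List.pyRange 0 12 1).filter (fun i => covb ms (i + 1))).map (fun i => i + 1)

lemma alt_eq_target (ml : List (List Int)) : merge_months_alt ml = target ml.flatten := by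
  show List.foldl (fun acc i =>
      if Nat.testBit ((ml.foldl (fun mask months => months.foldl fB mask) 0 |||
          (ml.foldl (fun mask months => months.foldl fB mask) 0 <<< 1) |||
          (ml.foldl (fun mask months => months.foldl fB mask) 0 >>> 11) |||
          (ml.foldl (fun mask months => months.foldl fB mask) 0 >>> 1) |||
          (ml.foldl (fun mask months => months.foldl fB mask) 0 <<< 11)) &&& 4095) i.toNat
      then acc ++ [i + 1] else acc) [] (PySem.List.pyRange 0 12 1) = target ml.flatten
  rw [show (ml.foldl (fun mask months => months.foldl fB mask) 0) =
      List.foldl fB 0 ml.flatten from (List.foldl_flatten).symm]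
  refine Eq.trans (PySem.List.foldl_congr_mem _ _
    (fun acc (i : Int) => if covb ml.flatten (i + 1) then acc ++ [i + 1] else acc) _ ?_) ?_
  · intro acc i hi
    rw [PySem.List.mem_pyRange_one] at hi
    have h1 : i = ((i.toNat : Nat) : Int) := by omega
    rw [testBit_cover ml.flatten i.toNat (by omega), ← h1]
  · rw [PySem.List.foldl_append_if (fun i => covb ml.flatten (i + 1)) (fun i => i + 1),
      List.nil_append]
    rfl

lemma mem_target (ms : List Int) (y : Int) :
    y ∈ target ms ↔ (1 ≤ y ∧ y ≤ 12) ∧ covb ms y = true := by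
  simp only [target, List.mem_map, List.mem_filter, PySem.List.mem_pyRange_one]
  constructor
  · rintro ⟨i, ⟨⟨h0, h1⟩, hc⟩, rfl⟩
    exact ⟨⟨by omega, by omega⟩, hc⟩
  · rintro ⟨⟨h0, h1⟩, hc⟩
    exact ⟨y - 1, ⟨⟨by omega, by omega⟩, by simpa using hc⟩, by omega⟩

lemma pairwise_target (ms : List Int) : List.Pairwise (· < ·) (target ms) := by
  exact List.Pairwise.map (fun i => i + 1)
    (fun (a b : Int) (h : a < b) => (by omega : a + 1 < b + 1))
    (List.Pairwise.sublist List.filter_sublist (PySem.List.pairwise_lt_pyRange_one 0 12))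

lemma nodup_target (ms : List Int) : (target ms).Nodup :=
  (pairwise_target ms).imp (fun h => ne_of_lt h)

-- ===== VERDICT =====
theorem merge_months_spec : Claim_equal_merge_months := by
  intro ml _
  unfold Spec_merge_months
  rw [alt_eq_target]
  by_cases hnil : ml = []
  · subst hnil
    simp [merge_months, target, covb]
  · have hA : merge_months ml = PySem.List.sorted
        ((List.foldl fA PySem.Set.empty ml.flatten).filter
          (fun m => decide (1 ≤ m ∧ m ≤ 12))) (fun x => x) false := by
      show (if ml = [] then [] else PySem.List.sorted
          ((ml.foldl (fun s months => months.foldl fA s) PySem.Set.empty).filter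
            (fun m => decide (1 ≤ m ∧ m ≤ 12))) (fun x => x) false) = _
      rw [if_neg hnil,
        show (ml.foldl (fun s months => months.foldl fA s) PySem.Set.empty) =
          List.foldl fA PySem.Set.empty ml.flatten from (List.foldl_flatten).symm]
    rw [hA]
    apply PySem.List.sorted_eq_of_perm_of_pairwise_lt _ _ _ _ (pairwise_target ml.flatten)
    rw [List.perm_ext_iff_of_nodup (nodup_target ml.flatten)
      (List.Nodup.filter _ (nodupA ml.flatten PySem.Set.empty List.nodup_nil))]
    intro y
    rw [mem_target, List.mem_filter, memA]
    simp only [PySem.Set.empty, List.not_mem_nil, false_or, decide_eq_true_eq]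
    tauto
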